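-- pv_equiv track=rewrite | github.com/YichaoOU/HemTools | bin/count_13nt_deletion.py | find_13nt_deletion
-- ===== SOURCE A (Python) =====
-- def find_13nt_deletion(x,y):
-- 	seed = "CAATA"
-- 	seed_rev = "TATTG"
--
-- 	repeat = "GCCTTGAC"
-- 	repeat_rev = "GTCAAGGC"
-- 	## x is aligned_sequence
-- 	## y is ref seq
-- 	delete_seq = ""
-- 	delete_seq_list = []
-- 	for i in range(len(x)):
-- 		if x[i]!="-":
-- 			if delete_seq != "":
-- 				if len(delete_seq) == 13:
-- 					delete_seq_list.append(delete_seq)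
-- 				delete_seq=""
-- 		else:
-- 			delete_seq+=y[i]
-- 	for s in delete_seq_list:
-- 		if seed in s:
-- 			tmp = s.split(seed)
-- 			if len(tmp)==2:
-- 				check_seq = tmp[1]+tmp[0]
-- 				if check_seq == repeat:
-- 					return 1
-- 				else:
-- 					print ("The deletion sequence %s%s doesn't match CAATAGCCTTGAC"%(seed,check_seq))
-- 			else:
-- 				print ("The deletion sequence %s doesn't match CAATAGCCTTGAC"%(s))
-- 		elif seed_rev in s:
-- 			tmp = s.split(seed_rev)
-- 			if len(tmp)==2:
-- 				check_seq = tmp[0]+tmp[1]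
-- 				if check_seq == repeat_rev:
-- 					return 1
-- 				else:
-- 					print ("The deletion sequence %s%s doesn't match GTCAAGGCTATTG"%(seed_rev,check_seq))
-- 			else:
-- 				print ("The deletion sequence %s doesn't match GTCAAGGCTATTG"%(s))
-- 		else:
-- 			print ("The deletion sequence %s doesn't match CAATAGCCTTGAC or GTCAAGGCTATTG"%(s))
--
-- 	return 0
-- ===== SOURCE B (Python) =====
-- def find_13nt_deletion(x, y):
-- 	seed = "CAATA"
-- 	seed_rev = "TATTG"
--
-- 	repeat = "GCCTTGAC"
-- 	repeat_rev = "GTCAAGGC"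
-- 	## x is aligned_sequence
-- 	## y is ref seq
-- 	# Gather gap runs by jumping from run to run instead of accumulating
-- 	# character by character: a run is recorded only when it is terminated
-- 	# by a following non-gap character (A flushes only on a non-gap char).
-- 	delete_seq_list = []
-- 	n = len(x)
-- 	i = 0
-- 	while i < n:
-- 		if x[i] != "-":
-- 			i += 1
-- 		else:
-- 			j = i
-- 			while j < n and x[j] == "-":
-- 				j += 1
-- 			if j < n and j - i == 13:
-- 				delete_seq_list.append(y[i:j])
-- 			i = j
-- 	for s in delete_seq_list:
-- 		if seed in s:
-- 			tmp = s.split(seed)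
-- 			if len(tmp)==2:
-- 				check_seq = tmp[1]+tmp[0]
-- 				if check_seq == repeat:
-- 					return 1
-- 				else:
-- 					print ("The deletion sequence %s%s doesn't match CAATAGCCTTGAC"%(seed,check_seq))
-- 			else:
-- 				print ("The deletion sequence %s doesn't match CAATAGCCTTGAC"%(s))
-- 		elif seed_rev in s:
-- 			tmp = s.split(seed_rev)
-- 			if len(tmp)==2:
-- 				check_seq = tmp[0]+tmp[1]
-- 				if check_seq == repeat_rev:
-- 					return 1
-- 				else:
-- 					print ("The deletion sequence %s%s doesn't match GTCAAGGCTATTG"%(seed_rev,check_seq))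
-- 			else:
-- 				print ("The deletion sequence %s doesn't match GTCAAGGCTATTG"%(s))
-- 		else:
-- 			print ("The deletion sequence %s doesn't match CAATAGCCTTGAC or GTCAAGGCTATTG"%(s))
--
-- 	return 0
-- ===== Notes on version B (the rewrite author's own statement) =====
-- stated objective: alternative
-- what changed: The character-by-character accumulator loop that grows delete_seq one y-character at a time is replaced by a two-pointer run scanner that jumps over each maximal gap run and records its y-slice in one step (a run is recorded only when terminated by a following non-gap character, which is when A flushes); the pattern-checking second loop is unchanged.
import Mathlib
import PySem

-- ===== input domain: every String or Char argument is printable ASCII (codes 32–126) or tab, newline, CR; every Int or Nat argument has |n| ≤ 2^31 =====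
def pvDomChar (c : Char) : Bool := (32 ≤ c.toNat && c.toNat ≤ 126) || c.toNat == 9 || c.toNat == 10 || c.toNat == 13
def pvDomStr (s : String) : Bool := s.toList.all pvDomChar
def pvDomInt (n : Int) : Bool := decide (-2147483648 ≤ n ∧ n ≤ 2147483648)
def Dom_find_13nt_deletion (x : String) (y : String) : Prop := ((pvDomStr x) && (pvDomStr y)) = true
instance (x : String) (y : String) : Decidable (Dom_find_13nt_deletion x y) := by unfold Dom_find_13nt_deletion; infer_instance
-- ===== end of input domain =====

-- B gathers the gap runs by jumping from run to run (recording a run's y-slice at once)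
-- instead of A's character-by-character accumulator; same return value (alternative, not claimed faster).
-- Equivalence is about the RETURN value only; both Pythons also print identical diagnostic messages.


-- ===== PORT A =====

-- second loop of A (identical source text in both Pythons, hence one shared helper):
-- scan delete_seq_list, return 1 on the first s matching either orientation, else 0
def find13Check (ls : List (List Char)) : Int :=
  match ls with
  | [] => 0
  | s :: rest =>
    if PySem.Chars.isIn "CAATA".toList s then
      let tmp := PySem.Chars.splitOn s "CAATA".toList
      if tmp.length = 2 then
        if tmp.getD 1 [] ++ tmp.getD 0 [] = "GCCTTGAC".toList then 1 else find13Check rest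
      else find13Check rest
    else if PySem.Chars.isIn "TATTG".toList s then
      let tmp := PySem.Chars.splitOn s "TATTG".toList
      if tmp.length = 2 then
        if tmp.getD 0 [] ++ tmp.getD 1 [] = "GTCAAGGC".toList then 1 else find13Check rest
      else find13Check rest
    else find13Check rest

-- A's first loop: for i in range(len(x)), accumulating delete_seq char by char
-- (y[i] raises IndexError in Python when i ≥ len(y); here pyGetD with a default,
-- those inputs are excluded by Pre_)
def find13Gather (xc yc : List Char) (i : Nat) (ds : List Char) (acc : List (List Char)) :
    List (List Char) :=
  if h : i < xc.length then
    if xc[i] ≠ '-' then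
      find13Gather xc yc (i + 1) []
        (if ds ≠ [] then (if ds.length = 13 then acc ++ [ds] else acc) else acc)
    else
      find13Gather xc yc (i + 1) (ds ++ [PySem.List.pyGetD yc (i : Int) ' ']) acc
  else acc
termination_by xc.length - i

def find_13nt_deletion (x : String) (y : String) : Int :=
  find13Check (find13Gather x.toList y.toList 0 [] [])

-- ===== PORT B =====

-- inner while: j advances over the gap run
def altSkip (xc : List Char) (j : Nat) : Nat :=
  if h : j < xc.length then
    if xc[j] = '-' then altSkip xc (j + 1) else j
  else j
termination_by xc.length - j

theorem altSkip_le (xc : List Char) (j : Nat) : j ≤ altSkip xc j := by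
  rw [altSkip]
  split_ifs with h1 h2
  · have := altSkip_le xc (j + 1); omega
  · exact Nat.le_refl j
  · exact Nat.le_refl j
termination_by xc.length - j

theorem altSkip_gt (xc : List Char) (i : Nat) (h : i < xc.length) (hd : xc[i] = '-') :
    i < altSkip xc i := by
  rw [altSkip]
  simp only [h, hd, dif_pos, if_pos]
  have := altSkip_le xc (i + 1); omega

-- outer while: jump run to run, record y[i:j] for a terminated run of length 13
def altScan (xc yc : List Char) (i : Nat) (acc : List (List Char)) : List (List Char) :=
  if h : i < xc.length then
    if xc[i] ≠ '-' then altScan xc yc (i + 1) acc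
    else
      altScan xc yc (altSkip xc i)
        (if altSkip xc i < xc.length ∧ altSkip xc i - i = 13 then
           acc ++ [PySem.List.slice yc (some (i : Int)) (some ((altSkip xc i : Nat) : Int))]
         else acc)
  else acc
termination_by xc.length - i
decreasing_by
  · omega
  · rename_i hnd; have := altSkip_gt xc i h (by simpa using hnd); omega

def find_13nt_deletion_alt (x : String) (y : String) : Int :=
  find13Check (altScan x.toList y.toList 0 [])

-- ===== PRECONDITION & SPEC =====
-- A raises IndexError (y[i]) when some gap position i of x is ≥ len(y); exactly those inputs are excluded.
def Pre_find_13nt_deletion (x : String) (y : String) : Prop :=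
  ∀ i < x.toList.length, x.toList.getD i ' ' = '-' → i < y.toList.length
instance (x : String) (y : String) : Decidable (Pre_find_13nt_deletion x y) := by
  unfold Pre_find_13nt_deletion; infer_instance

def pvWitness_find_13nt_deletion : String × String := ("AC-G", "ACTG")

def Spec_find_13nt_deletion (x : String) (y : String) (out : Int) : Prop := out = find_13nt_deletion_alt x y
instance (x : String) (y : String) (out : Int) : Decidable (Spec_find_13nt_deletion x y out) := by unfold Spec_find_13nt_deletion; infer_instance

-- ===== CLAIM (what is proved, stated in full; the proofs are below) =====
def Claim_equal_find_13nt_deletion : Prop := ∀ (x : String) (y : String), Dom_find_13nt_deletion x y → Pre_find_13nt_deletion x y → Spec_find_13nt_deletion x y (find_13nt_deletion x y)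

-- ===== LEMMAS AND PROOFS =====

-- altSkip never overshoots the string
theorem altSkip_le_length (xc : List Char) (j : Nat) (hj : j ≤ xc.length) :
    altSkip xc j ≤ xc.length := by
  rw [altSkip]
  split_ifs with h1 h2
  · exact altSkip_le_length xc (j + 1) h1
  · exact hj
  · exact hj
termination_by xc.length - j

-- every position strictly before altSkip's result (from j on) holds a dash
theorem altSkip_dash (xc : List Char) (j : Nat) :
    ∀ k, j ≤ k → k < altSkip xc j → xc.getD k ' ' = '-' := by
  intro k hjk hk
  rw [altSkip] at hk
  split_ifs at hk with h1 h2
  · rcases Nat.eq_or_lt_of_le hjk with rfl | hlt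
    · simpa [List.getD_eq_getElem?_getD, h1] using h2
    · exact altSkip_dash xc (j + 1) k hlt hk
  · omega
  · omega
termination_by xc.length - j

-- altSkip stops on a non-dash (when it stops inside the string)
theorem altSkip_stop (xc : List Char) (j : Nat) (h : altSkip xc j < xc.length) :
    xc.getD (altSkip xc j) ' ' ≠ '-' := by
  rw [altSkip] at h ⊢
  split_ifs with h1 h2
  · exact altSkip_stop xc (j + 1) (by simpa [h1, h2] using h)
  · simpa [List.getD_eq_getElem?_getD, h1] using h2
  · simp [h1] at h
termination_by xc.length - j

-- A's flush of delete_seq on meeting a non-dash character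
def flushA (ds : List Char) (acc : List (List Char)) : List (List Char) :=
  if ds ≠ [] ∧ ds.length = 13 then acc ++ [ds] else acc

-- the characters A's inner accumulation collects over positions [k, S)
def segY (yc : List Char) (k S : Nat) : List Char :=
  (List.range (S - k)).map (fun t => PySem.List.pyGetD yc ((k + t : Nat) : Int) ' ')

theorem segY_self (yc : List Char) (k : Nat) : segY yc k k = [] := by
  simp [segY]

theorem segY_length (yc : List Char) (k S : Nat) : (segY yc k S).length = S - k := by
  simp [segY]

theorem segY_cons (yc : List Char) (k S : Nat) (h : k < S) :
    segY yc k S = PySem.List.pyGetD yc ((k : Nat) : Int) ' ' :: segY yc (k + 1) S := by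
  have hc : S - k = (S - (k + 1)) + 1 := by omega
  simp only [segY, hc, List.range_succ_eq_map, List.map_cons, List.map_map]
  refine congrArg₂ List.cons (by simp) (List.map_congr_left ?_)
  intro t _
  show PySem.List.pyGetD yc ((k : Int) + ((t : Int) + 1)) ' ' = _
  congr 1
  omega

theorem segY_eq_take (yc : List Char) (k S : Nat) (hS : S ≤ yc.length) :
    segY yc k S = (yc.drop k).take (S - k) := by
  apply List.ext_getElem
  · simp [segY_length]; omega
  · intro t ht1 ht2
    have htS : t < S - k := by simpa [segY_length] using ht1
    have hkt : k + t < yc.length := by omega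
    have hcast : ((k : Int) + (t : Int)) = (((k + t : Nat)) : Int) := by push_cast; ring
    simp only [segY, List.getElem_map, List.getElem_range, List.getElem_take, List.getElem_drop,
      PySem.List.pyGetD_natCast]
    simp [List.getD_eq_getElem?_getD, hkt]

-- A's gather, traversed over one whole maximal dash run starting anywhere
theorem gather_run (xc yc : List Char) :
    ∀ k ds acc, k ≤ xc.length →
      find13Gather xc yc k ds acc =
        (if altSkip xc k < xc.length
         then find13Gather xc yc (altSkip xc k + 1) []
                (flushA (ds ++ segY yc k (altSkip xc k)) acc)
         else acc) := by
  intro k ds acc hk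
  by_cases h1 : k < xc.length
  · by_cases h2 : xc[k] = '-'
    · have hstep : altSkip xc k = altSkip xc (k + 1) := by
        rw [altSkip]; simp [h1, h2]
      rw [find13Gather]
      simp only [h1, dif_pos, h2, ite_false, not_true_eq_false, ne_eq]
      rw [gather_run xc yc (k + 1) _ acc h1, hstep]
      have hcons : segY yc k (altSkip xc (k + 1)) =
          PySem.List.pyGetD yc ((k : Nat) : Int) ' ' :: segY yc (k + 1) (altSkip xc (k + 1)) := by
        refine segY_cons yc k _ ?_
        have := altSkip_gt xc k h1 h2
        omega
      rw [hcons]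
      simp
    · have hstop : altSkip xc k = k := by
        rw [altSkip]; simp [h1, h2]
      rw [find13Gather]
      simp only [h1, dif_pos, h2, ne_eq, not_false_eq_true, if_pos]
      rw [hstop, if_pos h1, segY_self]
      have hflush : (if ds ≠ [] then (if ds.length = 13 then acc ++ [ds] else acc) else acc)
          = flushA (ds ++ []) acc := by
        simp only [flushA, List.append_nil]
        by_cases hds : ds = [] <;> by_cases hl : ds.length = 13 <;> simp [hds, hl]
      rw [hflush]
  · have hk' : k = xc.length := by omega
    have hstop : altSkip xc k = k := by
      rw [altSkip]; simp [h1]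
    rw [find13Gather, hstop]
    simp [hk']
termination_by k => xc.length - k
decreasing_by omega

-- the two first loops produce the same delete_seq_list
theorem gather_eq_scan (xc yc : List Char)
    (hpre : ∀ i < xc.length, xc.getD i ' ' = '-' → i < yc.length) :
    ∀ i acc, i ≤ xc.length →
      find13Gather xc yc i [] acc = altScan xc yc i acc := by
  intro i acc hi
  by_cases h1 : i < xc.length
  · by_cases h2 : xc[i] = '-'
    · -- a dash run starts at i
      have hgt : i < altSkip xc i := altSkip_gt xc i h1 h2
      have hle : altSkip xc i ≤ xc.length := altSkip_le_length xc i hi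
      rw [gather_run xc yc i [] acc hi]
      conv_rhs => rw [altScan, dif_pos h1, if_neg (by simp [h2])]
      simp only [List.nil_append]
      by_cases hS : altSkip xc i < xc.length
      · have hstopne : xc[altSkip xc i] ≠ '-' := by
          have := altSkip_stop xc i hS
          simpa [List.getD_eq_getElem?_getD, hS] using this
        have hylen : altSkip xc i ≤ yc.length := by
          have hdash : xc.getD (altSkip xc i - 1) ' ' = '-' :=
            altSkip_dash xc i _ (by omega) (by omega)
          have := hpre (altSkip xc i - 1) (by omega) hdash
          omega
        have hseg : flushA (segY yc i (altSkip xc i)) acc =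
            (if altSkip xc i < xc.length ∧ altSkip xc i - i = 13 then
               acc ++ [PySem.List.slice yc (some (i : Int)) (some ((altSkip xc i : Nat) : Int))]
             else acc) := by
          rw [PySem.List.slice_natCast]
          simp only [flushA, hS, true_and]
          have hne : segY yc i (altSkip xc i) ≠ [] := by
            intro hnil
            have := segY_length yc i (altSkip xc i)
            rw [hnil] at this
            simp at this
            omega
          by_cases h13 : altSkip xc i - i = 13
          · rw [if_pos h13, if_pos ⟨hne, by rw [segY_length]; exact h13⟩,
              segY_eq_take yc i _ hylen]
          · rw [if_neg h13, if_neg]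
            rintro ⟨-, hl⟩
            rw [segY_length] at hl
            exact h13 hl
        rw [if_pos hS, hseg,
          gather_eq_scan xc yc hpre (altSkip xc i + 1) _ (by omega)]
        conv_rhs => rw [altScan, dif_pos hS, if_pos (by simpa using hstopne)]
      · rw [if_neg hS, if_neg (fun h => hS h.1)]
        rw [altScan]
        simp [hS]
    · rw [find13Gather, altScan]
      simp only [h1, dif_pos, h2, ne_eq, not_false_eq_true, if_pos]
      simpa using gather_eq_scan xc yc hpre (i + 1) acc h1
  · rw [find13Gather, altScan]
    simp [h1]
termination_by i _ _ => xc.length - i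
decreasing_by all_goals omega

-- ===== VERDICT (by name: the statement is the Claim_ definition above) =====
theorem find_13nt_deletion_spec : Claim_equal_find_13nt_deletion := by
  intro x y _ hpre
  unfold Spec_find_13nt_deletion find_13nt_deletion find_13nt_deletion_alt
  exact congrArg find13Check (gather_eq_scan x.toList y.toList hpre 0 [] (Nat.zero_le _))
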